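-- pv_equiv track=rewrite | github.com/hugovk/word-tools | word_tools.py | update_tweet_with_words
-- ===== SOURCE A (Python) =====
-- def update_tweet_with_words(tweet, words):
--     """
--     IN: tweet with a prefix, list of words
--     OUT: updated tweet, list of words_remaining
--     """
--     new_tweet = tweet
--     words_remaining = list(words)
--     for i, word in enumerate(words):
--         if i == 0:
--             new_tweet = tweet + word
--         else:
--             # new_tweet = tweet + ", " + word
--             new_tweet = tweet + " " + word
--         if len(new_tweet) > 140:
--             break
--         else:
--             tweet = new_tweet
--         words_remaining.pop(0)
--     return tweet, words_remaining
-- ===== SOURCE B (Python) =====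
-- def update_tweet_with_words(tweet, words):
--     """
--     IN: tweet with a prefix, list of words
--     OUT: updated tweet, list of words_remaining
--     """
--     # cumulative tweet length after taking each successive word
--     # (first word joins with no separator, later ones cost one space extra)
--     cums = []
--     total = len(tweet)
--     for i, word in enumerate(words):
--         total += len(word) + (1 if i else 0)
--         cums.append(total)
--     # binary search for k = number of leading entries of cums that are <= 140
--     lo, hi = 0, len(cums)
--     while lo < hi:
--         mid = (lo + hi) // 2
--         if 140 < cums[mid]:
--             hi = mid
--         else:
--             lo = mid + 1
--     k = lo
--     return tweet + " ".join(words[:k]), list(words[k:])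
-- ===== Notes on version B (the rewrite author's own statement) =====
-- stated objective: alternative
-- what changed: A grows the tweet string inside the loop and pops words one by one; B computes a cumulative-length table, binary-searches it for the cut point k, and reconstructs the result with one join and two slices.
import Mathlib
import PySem

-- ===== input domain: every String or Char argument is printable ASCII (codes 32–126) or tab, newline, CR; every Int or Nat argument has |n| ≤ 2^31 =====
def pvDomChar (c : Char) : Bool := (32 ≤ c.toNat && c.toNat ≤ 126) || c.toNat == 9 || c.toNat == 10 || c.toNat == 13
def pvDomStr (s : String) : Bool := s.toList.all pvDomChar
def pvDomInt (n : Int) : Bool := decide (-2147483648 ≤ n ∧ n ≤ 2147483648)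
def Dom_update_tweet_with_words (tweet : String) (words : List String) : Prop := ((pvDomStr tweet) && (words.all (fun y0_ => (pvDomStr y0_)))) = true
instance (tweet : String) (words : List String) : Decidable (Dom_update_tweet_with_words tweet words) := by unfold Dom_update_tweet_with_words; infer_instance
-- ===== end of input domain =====

-- B replaces A's incremental string building (tweet grows inside the loop) by a cumulative-length
-- table plus a binary search for the cut point k, then one join/slice reconstruction (alternative
-- algorithm; equivalence of the return values is proved below).

-- ===== PORT A =====
-- the for-loop of A: `i` is the enumerate index, `rest` the words still to visit,
-- `rem` the words_remaining list (pop(0) = drop 1); `break` returns (tweet, rem)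
def pyGoA_update (tweet : String) (i : Nat) (rest : List String) (rem : List String) :
    String × List String :=
  match rest with
  | [] => (tweet, rem)
  | word :: ws =>
    let new_tweet := if i = 0 then tweet ++ word else tweet ++ " " ++ word
    if 140 < PySem.Str.len new_tweet then (tweet, rem)
    else pyGoA_update new_tweet (i + 1) ws (rem.drop 1)

def update_tweet_with_words (tweet : String) (words : List String) : String × List String :=
  pyGoA_update tweet 0 words words

-- ===== PORT B =====
-- the cums-building loop of Source B (running total, +1 separator except before the first word)
def altCums_update (total : Int) (i : Nat) (ws : List String) : List Int :=
  match ws with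
  | [] => []
  | word :: rest =>
    let t := total + PySem.Str.len word + (if i = 0 then 0 else 1)
    t :: altCums_update t (i + 1) rest

-- the hand-written while-loop binary search of Source B (lo, hi as in the source)
def altBisect_update (cums : List Int) (lo hi : Nat) : Nat :=
  if lo < hi then
    let mid := (lo + hi) / 2
    if 140 < cums.getD mid 0 then altBisect_update cums lo mid
    else altBisect_update cums (mid + 1) hi
  else lo
termination_by hi - lo

def update_tweet_with_words_alt (tweet : String) (words : List String) : String × List String :=
  let cums := altCums_update (PySem.Str.len tweet) 0 words
  let k := altBisect_update cums 0 cums.length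
  (tweet ++ PySem.Str.join " " (words.take k), words.drop k)

-- ===== PRECONDITION & SPEC =====
def Spec_update_tweet_with_words (tweet : String) (words : List String) (out : String × List String) : Prop := out = update_tweet_with_words_alt tweet words
instance (tweet : String) (words : List String) (out : String × List String) : Decidable (Spec_update_tweet_with_words tweet words out) := by unfold Spec_update_tweet_with_words; infer_instance

-- ===== CLAIM (what is proved, stated in full; the proofs are below) =====
def Claim_equal_update_tweet_with_words : Prop := ∀ (tweet : String) (words : List String), Dom_update_tweet_with_words tweet words → Spec_update_tweet_with_words tweet words (update_tweet_with_words tweet words)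

-- ===== LEMMAS AND PROOFS =====

-- number of leading cumulative lengths that still fit in 140 characters
def twLen_update (a : List Int) : Nat := (a.takeWhile (fun c => decide (c ≤ 140))).length

-- the index argument of altCums_update only matters through `= 0`
lemma altCums_pos (ws : List String) : ∀ (t : Int) (i j : Nat), i ≠ 0 → j ≠ 0 →
    altCums_update t i ws = altCums_update t j ws := by
  induction ws with
  | nil => intro t i j _ _; rfl
  | cons w rest ih =>
    intro t i j hi hj
    simp only [altCums_update, if_neg hi, if_neg hj]
    exact congrArg _ (ih _ (i+1) (j+1) (by omega) (by omega))

lemma altCums_lb (ws : List String) : ∀ (t : Int) (i : Nat) (c : Int),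
    c ∈ altCums_update t i ws → t ≤ c := by
  induction ws with
  | nil => intro t i c hc; simp [altCums_update] at hc
  | cons w rest ih =>
    intro t i c hc
    have hw : (0:Int) ≤ PySem.Str.len w := by simp [PySem.Str.len_eq]
    simp only [altCums_update, List.mem_cons] at hc
    rcases hc with h | h
    · subst h; split_ifs <;> omega
    · have := ih _ (i+1) c h
      split_ifs at this <;> omega

lemma altCums_sorted (ws : List String) : ∀ (t : Int) (i : Nat),
    (altCums_update t i ws).Pairwise (· ≤ ·) := by
  induction ws with
  | nil => intro t i; simp [altCums_update]
  | cons w rest ih =>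
    intro t i
    simp only [altCums_update, List.pairwise_cons]
    exact ⟨fun c hc => altCums_lb rest _ _ c hc, ih _ _⟩

lemma pairwise_getD_mono (a : List Int) (h : a.Pairwise (· ≤ ·)) :
    ∀ (j j' : Nat), j ≤ j' → j' < a.length → a.getD j 0 ≤ a.getD j' 0 := by
  induction a with
  | nil => intro j j' _ h; simp at h
  | cons x xs ih =>
    rcases List.pairwise_cons.mp h with ⟨hx, hxs⟩
    intro j j' hjj hj'
    match j, j' with
    | 0, 0 => simp
    | 0, (j'+1) =>
      simp only [List.getD_cons_zero, List.getD_cons_succ]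
      have hlt : j' < xs.length := by simpa using hj'
      have hm : xs.getD j' 0 ∈ xs := by
        rw [List.getD_eq_getElem xs 0 hlt]; exact List.getElem_mem hlt
      exact hx _ hm
    | (j+1), (j'+1) =>
      simp only [List.getD_cons_succ]
      exact ih hxs j j' (by omega) (by simpa using hj')

lemma twLen_le (a : List Int) : twLen_update a ≤ a.length :=
  ((List.takeWhile_sublist _).length_le)

lemma twLen_pass (a : List Int) : ∀ (j : Nat), j < twLen_update a → a.getD j 0 ≤ 140 := by
  induction a with
  | nil => intro j hj; simp [twLen_update] at hj
  | cons x xs ih =>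
    intro j hj
    by_cases hx : x ≤ 140
    · match j with
      | 0 => simpa using hx
      | (j+1) =>
        simp only [twLen_update, List.takeWhile_cons, decide_eq_true hx] at hj
        simp only [List.getD_cons_succ]
        exact ih j (by simpa [twLen_update] using Nat.lt_of_succ_lt_succ (by simpa using hj))
    · simp [twLen_update, hx] at hj

lemma twLen_fail (a : List Int) : ∀ (h : twLen_update a < a.length),
    140 < a.getD (twLen_update a) 0 := by
  induction a with
  | nil => intro h0; simp [twLen_update] at h0
  | cons x xs ih =>
    intro h
    by_cases hx : x ≤ 140
    · have he : twLen_update (x :: xs) = twLen_update xs + 1 := by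
        simp [twLen_update, hx]
      rw [he] at h ⊢
      simp only [List.getD_cons_succ]
      exact ih (by simpa using h)
    · have he : twLen_update (x :: xs) = 0 := by
        simp [twLen_update, hx]
      rw [he]; simpa using lt_of_not_ge hx

lemma bisect_eq (a : List Int) (ha : a.Pairwise (· ≤ ·)) :
    ∀ (fuel lo hi : Nat), hi - lo ≤ fuel → hi ≤ a.length →
      lo ≤ twLen_update a → twLen_update a ≤ hi →
      altBisect_update a lo hi = twLen_update a := by
  intro fuel
  induction fuel with
  | zero =>
    intro lo hi hf _ hlo hhi
    rw [altBisect_update]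
    rw [if_neg (by omega)]
    omega
  | succ n ih =>
    intro lo hi hf hlen hlo hhi
    rw [altBisect_update]
    by_cases hlh : lo < hi
    · rw [if_pos hlh]
      have hmid1 : lo ≤ (lo + hi) / 2 := by omega
      have hmid2 : (lo + hi) / 2 < hi := by omega
      by_cases hc : 140 < a.getD ((lo + hi) / 2) 0
      · rw [if_pos hc]
        have hP : twLen_update a ≤ (lo + hi) / 2 := by
          by_contra hP
          have := twLen_pass a ((lo + hi) / 2) (by omega)
          omega
        exact ih lo ((lo + hi) / 2) (by omega) (by omega) hlo hP
      · rw [if_neg hc]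
        have hP : (lo + hi) / 2 + 1 ≤ twLen_update a := by
          by_contra hP
          have h1 : twLen_update a < a.length := by omega
          have h2 := twLen_fail a h1
          have h3 := pairwise_getD_mono a ha (twLen_update a) ((lo + hi) / 2)
            (by omega) (by omega)
          omega
        exact ih ((lo + hi) / 2 + 1) hi (by omega) hlen hP hhi
    · rw [if_neg hlh]
      omega

-- join over a nonempty prefix is A's fold, with no separator before the first word
lemma join_fold (l : List String) : ∀ (tweet w : String),
    tweet ++ PySem.Str.join " " (w :: l) =
      List.foldl (fun t w' => t ++ " " ++ w') (tweet ++ w) l := by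
  induction l with
  | nil =>
    intro tweet w
    simp only [List.foldl_nil]
    refine congrArg (tweet ++ ·) (String.toList_inj.mp ?_)
    simp [PySem.Str.toList_join, PySem.Chars.join_singleton]
  | cons x l ih =>
    intro tweet w
    have hj : PySem.Str.join " " (w :: x :: l) = w ++ " " ++ PySem.Str.join " " (x :: l) := by
      refine String.toList_inj.mp ?_
      simp [PySem.Str.toList_join, String.toList_append, PySem.Chars.join_cons_cons]
    rw [hj, List.foldl_cons]
    have := ih (tweet ++ w ++ " ") x
    simp only [String.append_assoc] at this ⊢
    exact this

-- characterisation of A's loop after the first word has been consumed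
lemma goA_spec (ws : List String) : ∀ (tweet : String) (i : Nat) (rem : List String), i ≠ 0 →
    pyGoA_update tweet i ws rem =
      (List.foldl (fun t w' => t ++ " " ++ w') tweet
         (ws.take (twLen_update (altCums_update (PySem.Str.len tweet) 1 ws))),
       rem.drop (twLen_update (altCums_update (PySem.Str.len tweet) 1 ws))) := by
  induction ws with
  | nil =>
    intro tweet i rem hi
    simp [pyGoA_update, altCums_update, twLen_update]
  | cons w ws ih =>
    intro tweet i rem hi
    have hsp : PySem.Str.len " " = (1 : Int) := by decide
    have hlen : PySem.Str.len (tweet ++ " " ++ w)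
        = PySem.Str.len tweet + PySem.Str.len w + 1 := by
      rw [PySem.Str.len_append, PySem.Str.len_append, hsp]; ring
    have hcums : altCums_update (PySem.Str.len tweet) 1 (w :: ws)
        = (PySem.Str.len tweet + PySem.Str.len w + 1)
          :: altCums_update (PySem.Str.len tweet + PySem.Str.len w + 1) 1 ws := by
      simp only [altCums_update]
      exact congrArg _ (altCums_pos ws _ 2 1 (by omega) (by omega))
    rw [pyGoA_update]
    simp only [if_neg hi]
    by_cases hc : 140 < PySem.Str.len (tweet ++ " " ++ w)
    · rw [if_pos hc]
      rw [hlen] at hc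
      have hd : decide (PySem.Str.len tweet + PySem.Str.len w + 1 ≤ 140) = false := by
        simpa using (by omega : ¬ (PySem.Str.len tweet + PySem.Str.len w + 1 ≤ 140))
      have h0 : twLen_update (altCums_update (PySem.Str.len tweet) 1 (w :: ws)) = 0 := by
        rw [hcums]
        simp only [twLen_update, List.takeWhile_cons, hd]
        rfl
      rw [h0]
      simp
    · rw [if_neg hc]
      rw [hlen] at hc
      have hd : decide (PySem.Str.len tweet + PySem.Str.len w + 1 ≤ 140) = true := by
        simpa using (by omega : PySem.Str.len tweet + PySem.Str.len w + 1 ≤ 140)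
      have hk : twLen_update (altCums_update (PySem.Str.len tweet) 1 (w :: ws))
          = twLen_update (altCums_update (PySem.Str.len tweet + PySem.Str.len w + 1) 1 ws) + 1 := by
        rw [hcums]
        simp only [twLen_update, List.takeWhile_cons, hd]
        simp
      rw [hk]
      have := ih (tweet ++ " " ++ w) (i + 1) (rem.drop 1) (by omega)
      rw [hlen] at this
      rw [this]
      refine congrArg₂ Prod.mk rfl ?_
      rw [List.drop_drop, Nat.add_comm]

-- ===== VERDICT (by name: the statement is the Claim_ definition above) =====
lemma join_nil_str : PySem.Str.join " " [] = "" := by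
  refine String.toList_inj.mp ?_
  simp [PySem.Str.toList_join, PySem.Chars.join, List.intercalate]

lemma bisect_full (a : List Int) (ha : a.Pairwise (· ≤ ·)) :
    altBisect_update a 0 a.length = twLen_update a :=
  bisect_eq a ha a.length 0 a.length (by omega) le_rfl (Nat.zero_le _) (twLen_le a)

theorem update_tweet_with_words_spec : Claim_equal_update_tweet_with_words := by
  intro tweet words _hdom
  unfold Spec_update_tweet_with_words
  unfold update_tweet_with_words update_tweet_with_words_alt
  simp only []
  rw [bisect_full _ (altCums_sorted words _ _)]
  cases words with
  | nil =>
    rw [pyGoA_update]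
    simp [altCums_update, twLen_update, join_nil_str]
  | cons w ws =>
    have hlen0 : PySem.Str.len (tweet ++ w) = PySem.Str.len tweet + PySem.Str.len w :=
      PySem.Str.len_append tweet w
    have hcums : altCums_update (PySem.Str.len tweet) 0 (w :: ws)
        = (PySem.Str.len tweet + PySem.Str.len w)
          :: altCums_update (PySem.Str.len tweet + PySem.Str.len w) 1 ws := by
      simp only [altCums_update, reduceIte, add_zero]
    rw [pyGoA_update]
    simp only [reduceIte, Nat.zero_add]
    by_cases hc : 140 < PySem.Str.len (tweet ++ w)
    · rw [if_pos hc]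
      rw [hlen0] at hc
      have hd : decide (PySem.Str.len tweet + PySem.Str.len w ≤ 140) = false := by
        simpa using (by omega : ¬ (PySem.Str.len tweet + PySem.Str.len w ≤ 140))
      have h0 : twLen_update (altCums_update (PySem.Str.len tweet) 0 (w :: ws)) = 0 := by
        rw [hcums]
        simp only [twLen_update, List.takeWhile_cons, hd]
        rfl
      rw [h0]
      simp [join_nil_str]
    · rw [if_neg hc]
      rw [hlen0] at hc
      have hd : decide (PySem.Str.len tweet + PySem.Str.len w ≤ 140) = true := by
        simpa using (by omega : PySem.Str.len tweet + PySem.Str.len w ≤ 140)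
      have hk : twLen_update (altCums_update (PySem.Str.len tweet) 0 (w :: ws))
          = twLen_update (altCums_update (PySem.Str.len tweet + PySem.Str.len w) 1 ws) + 1 := by
        rw [hcums]
        simp only [twLen_update, List.takeWhile_cons, hd]
        simp
      rw [hk]
      have hgo := goA_spec ws (tweet ++ w) 1 ((w :: ws).drop 1) (by omega)
      rw [hlen0] at hgo
      rw [hgo]
      refine congrArg₂ Prod.mk ?_ rfl
      rw [List.take_succ_cons]
      exact (join_fold _ tweet w).symm
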